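-- pv_equiv track=rewrite | github.com/woosang0430/Programmers | 온코더/3회 코딩테스트/test3-1.py | solution
-- ===== SOURCE A (Python) =====
-- def solution(document):
--     limit_list = ['?','!']
--     result = []
--     # 공백까지 한번에 확인
--     for i in document:
--         # 물음표나 느낌표가 아니면 바로 붙이기
--         if i not in limit_list:
--             result.append(i)
--         # 물음표나 느낌표면
--         else:
--             # 문장의 처음이나 앞에 알파벳이나 빈칸이면 바로 붙이기
--             if len(result) == 0 or result[-1] not in limit_list:
--                 result.append(i)
--             else:
--                 # 현재 문자가 물음표고 이전의 문자가 느낌표면 물음표로 바꾸기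
--                 if i == '?' and result[-1] == '!':
--                     result[-1] = i
--
--     return ''.join(result)
-- ===== SOURCE B (Python) =====
-- from itertools import groupby
--
-- def solution(document):
--     parts = []
--     for is_punct, group in groupby(document, key=lambda c: c in '?!'):
--         g = ''.join(group)
--         if is_punct:
--             parts.append('?' if '?' in g else '!')
--         else:
--             parts.append(g)
--     return ''.join(parts)
-- ===== Notes on version B (the rewrite author's own statement) =====
-- stated objective: idiomatic
-- what changed: B groups the string into maximal '?'/'!' runs with itertools.groupby and emits one char per run ('?' if the run contains '?', else '!'), instead of A's char-by-char loop that mutates the result list's last element.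
import Mathlib
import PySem

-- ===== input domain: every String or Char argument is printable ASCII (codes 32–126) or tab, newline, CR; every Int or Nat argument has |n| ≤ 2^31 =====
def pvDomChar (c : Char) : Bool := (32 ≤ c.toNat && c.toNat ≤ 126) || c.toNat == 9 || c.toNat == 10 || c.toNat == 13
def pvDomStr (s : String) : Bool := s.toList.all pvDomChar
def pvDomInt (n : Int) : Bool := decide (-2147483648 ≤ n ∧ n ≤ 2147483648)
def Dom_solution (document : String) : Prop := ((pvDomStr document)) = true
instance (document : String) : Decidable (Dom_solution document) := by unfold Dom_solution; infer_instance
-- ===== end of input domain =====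

-- B collapses each maximal '?'/'!' run as a unit (groupby) instead of A's char-by-char
-- last-element mutation; objective: idiomatic/alternative, same result.

-- ===== PORT A =====
-- result[-1] is read via getLastD (only reached when result is nonempty) and
-- result[-1] = i becomes dropLast ++ [i]; otherwise a step-for-step transliteration.
def solStep (result : List Char) (i : Char) : List Char :=
  if ¬ (i = '?' ∨ i = '!') then result ++ [i]
  else if result.length = 0 ∨ ¬ (result.getLastD ' ' = '?' ∨ result.getLastD ' ' = '!') then
    result ++ [i]
  else if i = '?' ∧ result.getLastD ' ' = '!' then result.dropLast ++ [i]
  else result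

def solution (document : String) : String :=
  String.ofList (document.toList.foldl solStep [])

-- ===== PORT B =====
def bPunct (c : Char) : Bool := c == '?' || c == '!'

-- groupby over the characters: each maximal punctuation run becomes one char.
def bGo : List Char → List Char
  | [] => []
  | c :: rest =>
    if bPunct c then
      (if (c :: rest.takeWhile bPunct).contains '?' then '?' else '!') ::
        bGo (rest.dropWhile bPunct)
    else c :: bGo rest
termination_by l => l.length
decreasing_by
  · have := List.length_dropWhile_le bPunct rest
    simp; omega
  · simp

def solution_alt (document : String) : String :=
  String.ofList (bGo document.toList)

-- ===== PRECONDITION & SPEC =====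
def Spec_solution (document : String) (out : String) : Prop := out = solution_alt document
instance (document : String) (out : String) : Decidable (Spec_solution document out) := by
  unfold Spec_solution; infer_instance

-- ===== CLAIM (what is proved, stated in full; the proofs are below) =====
def Claim_equal_solution : Prop := ∀ (document : String), Dom_solution document → Spec_solution document (solution document)

-- ===== LEMMAS AND PROOFS =====

-- the head of dropWhile fails the predicate
lemma dropWhile_head_false {p : Char → Bool} :
    ∀ (l : List Char) (c : Char) (t : List Char), l.dropWhile p = c :: t → p c = false := by
  intro l
  induction l with
  | nil => intro c t h; simp [List.dropWhile] at h
  | cons a l ih =>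
    intro c t h
    by_cases hp : p a
    · rw [List.dropWhile_cons_of_pos hp] at h; exact ih c t h
    · rw [List.dropWhile_cons_of_neg hp] at h
      cases h
      simpa using hp

-- A over a run of punctuation, starting from a state whose last char is punctuation p:
-- the run collapses, the last char becomes '?' iff p or the run has a '?'.
lemma run_collapse :
    ∀ (run : List Char), (∀ c ∈ run, bPunct c = true) →
    ∀ (res : List Char) (p : Char), res.getLast? = some p → bPunct p = true →
      List.foldl solStep res run =
        res.dropLast ++ [if p == '?' || run.contains '?' then '?' else '!'] := by
  intro run
  induction run with
  | nil =>
    intro _ res p hlast hp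
    have hres : res ≠ [] := by intro h; simp [h] at hlast
    have hdl : res.dropLast ++ [p] = res := by
      have := List.dropLast_append_getLast hres
      rwa [List.getLast_eq_iff_getLast?_eq_some hres |>.mpr hlast] at this
    rcases (by simpa [bPunct] using hp : p = '?' ∨ p = '!') with rfl | rfl <;>
      simpa using hdl.symm
  | cons c rs ih =>
    intro hall res p hlast hp
    have hres : res ≠ [] := by intro h; simp [h] at hlast
    have hc : bPunct c = true := hall c (by simp)
    have hall' : ∀ x ∈ rs, bPunct x = true := fun x hx => hall x (by simp [hx])
    rcases (by simpa [bPunct] using hp : p = '?' ∨ p = '!') with rfl | rfl <;>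
      rcases (by simpa [bPunct] using hc : c = '?' ∨ c = '!') with rfl | rfl
    · -- p = '?', c = '?': state unchanged
      rw [List.foldl_cons, show solStep res '?' = res by
        simp [solStep, List.getLastD_eq_getLast?, hlast, List.length_eq_zero_iff, hres]]
      rw [ih hall' res '?' hlast (by decide)]
      simp
    · -- p = '?', c = '!': state unchanged
      rw [List.foldl_cons, show solStep res '!' = res by
        simp [solStep, List.getLastD_eq_getLast?, hlast, List.length_eq_zero_iff, hres]]
      rw [ih hall' res '?' hlast (by decide)]
      simp
    · -- p = '!', c = '?': last element becomes '?'
      rw [List.foldl_cons, show solStep res '?' = res.dropLast ++ ['?'] by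
        simp [solStep, List.getLastD_eq_getLast?, hlast, List.length_eq_zero_iff, hres]]
      rw [ih hall' (res.dropLast ++ ['?']) '?' (by simp) (by decide)]
      simp
    · -- p = '!', c = '!': state unchanged
      rw [List.foldl_cons, show solStep res '!' = res by
        simp [solStep, List.getLastD_eq_getLast?, hlast, List.length_eq_zero_iff, hres]]
      rw [ih hall' res '!' hlast (by decide)]
      simp

-- valid starting states for the main induction: the accumulator's last char is not
-- punctuation, or the next char is not punctuation
def GoodState (res l : List Char) : Prop :=
  (∀ p, res.getLast? = some p → bPunct p = false) ∨
  (∀ c t, l = c :: t → bPunct c = false)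

lemma main_lemma :
    ∀ (n : Nat) (l : List Char), l.length ≤ n → ∀ (res : List Char), GoodState res l →
      List.foldl solStep res l = res ++ bGo l := by
  intro n
  induction n with
  | zero => intro l hl res _; rw [List.length_eq_zero_iff.mp (Nat.le_zero.mp hl)]; simp [bGo]
  | succ n ih =>
    intro l hl res hgood
    match l with
    | [] => simp [bGo]
    | c :: rest =>
      have hrl : rest.length ≤ n := by simpa using hl
      by_cases hc : bPunct c = true
      · -- punctuation run starts here
        have hlastOk : ∀ p, res.getLast? = some p → bPunct p = false := by
          rcases hgood with h | h
          · exact h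
          · exact absurd hc (by simp [h c rest rfl])
        have hstep : solStep res c = res ++ [c] := by
          rcases hres : res.getLast? with _ | p
          · have : res = [] := by
              cases res with
              | nil => rfl
              | cons a t => simp [List.getLast?_eq_some_getLast] at hres
            simp [solStep, this]
          · have hnp := hlastOk p hres
            have hp1 : ¬ p = '?' := by rintro rfl; simp [bPunct] at hnp
            have hp2 : ¬ p = '!' := by rintro rfl; simp [bPunct] at hnp
            rcases (by simpa [bPunct] using hc : c = '?' ∨ c = '!') with rfl | rfl <;>
              simp [solStep, List.getLastD_eq_getLast?, hres, hp1, hp2]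
        have hsplit : rest = rest.takeWhile bPunct ++ rest.dropWhile bPunct :=
          (List.takeWhile_append_dropWhile).symm
        have hallrun : ∀ x ∈ rest.takeWhile bPunct, bPunct x = true := by
          intro x hx; exact List.mem_takeWhile_imp hx
        have hfold : List.foldl solStep (res ++ [c]) rest =
            List.foldl solStep (List.foldl solStep (res ++ [c]) (rest.takeWhile bPunct))
              (rest.dropWhile bPunct) := by
          conv_lhs => rw [hsplit]
          rw [List.foldl_append]
        rw [List.foldl_cons, hstep, hfold]
        rw [run_collapse (rest.takeWhile bPunct) hallrun (res ++ [c]) c (by simp) hc]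
        rw [List.dropLast_concat]
        have hgood' : GoodState
            (res ++ [if c == '?' || (rest.takeWhile bPunct).contains '?' then '?' else '!'])
            (rest.dropWhile bPunct) := by
          right; intro c' t' h'; exact dropWhile_head_false rest c' t' h'
        have hlen : (rest.dropWhile bPunct).length ≤ n :=
          le_trans (List.length_dropWhile_le bPunct rest) hrl
        rw [ih (rest.dropWhile bPunct) hlen _ hgood']
        rw [show bGo (c :: rest) =
            (if (c :: rest.takeWhile bPunct).contains '?' then '?' else '!') ::
              bGo (rest.dropWhile bPunct) by rw [bGo]; simp [hc]]
        simp
        by_cases h : c = '?' <;> simp [h, eq_comm]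
      · -- ordinary character: appended, and keeps the state good
        have hcp : ¬ (c = '?' ∨ c = '!') := by
          rintro (rfl | rfl) <;> simp [bPunct] at hc
        have hstep : solStep res c = res ++ [c] := by simp [solStep, hcp]
        rw [List.foldl_cons, hstep]
        have hgood' : GoodState (res ++ [c]) rest := by
          left; intro p hp
          simp at hp
          simpa [← hp] using (by simpa using hc : bPunct c = false)
        rw [ih rest hrl _ hgood']
        rw [show bGo (c :: rest) = c :: bGo rest by rw [bGo]; simp [hc]]
        simp

-- ===== VERDICT (by name: the statement is the Claim_ definition above) =====
theorem solution_spec : Claim_equal_solution := by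
  intro document _
  unfold Spec_solution solution solution_alt
  rw [main_lemma document.toList.length document.toList le_rfl [] (Or.inl (by simp))]
  simp
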